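-- pv_equiv track=rewrite | github.com/jeffbrianho/python_110 | py119_written_practice/work_space.py | count_vowels_until_x
-- ===== SOURCE A (Python) =====
-- def count_vowels_until_x(string):
--     VOWELS = 'aeiou'
--     count = 0
--
--     for char in string:
--         if char in VOWELS:
--             count += 1
--         elif char == 'x':
--             break
--         else:
--             continue
--
--     return count
-- ===== SOURCE B (Python) =====
-- def count_vowels_until_x(string):
--     prefix = string.partition('x')[0]
--     return sum(1 for c in prefix if c in 'aeiou')
-- ===== Notes on version B (the rewrite author's own statement) =====
-- stated objective: simpler
-- what changed: B separates boundary-finding from counting: it takes the prefix before the first 'x' via partition and counts vowels in it with sum, instead of A's single loop with counter and early break.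
import Mathlib
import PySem

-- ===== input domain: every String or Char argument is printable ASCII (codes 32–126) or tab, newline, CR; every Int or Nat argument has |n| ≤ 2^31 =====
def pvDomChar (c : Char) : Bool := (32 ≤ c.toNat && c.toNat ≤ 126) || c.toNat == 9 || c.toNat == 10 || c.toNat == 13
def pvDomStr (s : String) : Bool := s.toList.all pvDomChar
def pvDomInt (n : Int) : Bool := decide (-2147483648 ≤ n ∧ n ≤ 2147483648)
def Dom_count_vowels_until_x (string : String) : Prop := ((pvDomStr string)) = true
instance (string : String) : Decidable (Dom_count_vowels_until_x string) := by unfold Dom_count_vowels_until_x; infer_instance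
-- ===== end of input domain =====

-- B separates boundary-finding (prefix before the first 'x') from vowel counting; objective: simpler.

-- ===== PORT A =====
-- the for-loop with early break, as structural recursion over the characters with the count accumulator
def pvGoA : List Char → Int → Int
  | [], count => count
  | c :: rest, count =>
    if ("aeiou".toList.contains c) then pvGoA rest (count + 1)
    else if c = 'x' then count
    else pvGoA rest count

def count_vowels_until_x (string : String) : Int := pvGoA string.toList 0

-- ===== PORT B =====
-- prefix = string.partition('x')[0]  (= everything before the first 'x'); then count vowels in it
def count_vowels_until_x_alt (string : String) : Int :=
  let pref := string.toList.takeWhile (fun c => c ≠ 'x')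
  ((pref.filter (fun c => "aeiou".toList.contains c)).length : Int)

-- ===== PRECONDITION & SPEC =====
def Spec_count_vowels_until_x (string : String) (out : Int) : Prop := out = count_vowels_until_x_alt string
instance (string : String) (out : Int) : Decidable (Spec_count_vowels_until_x string out) := by unfold Spec_count_vowels_until_x; infer_instance

-- ===== CLAIM (what is proved, stated in full; the proofs are below) =====
def Claim_equal_count_vowels_until_x : Prop := ∀ (string : String), Dom_count_vowels_until_x string → Spec_count_vowels_until_x string (count_vowels_until_x string)

-- ===== LEMMAS AND PROOFS =====
lemma pvGoA_eq (l : List Char) (count : Int) :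
    pvGoA l count =
      count + ((l.takeWhile (fun c => c ≠ 'x')).filter
        (fun c => "aeiou".toList.contains c)).length := by
  induction l generalizing count with
  | nil => simp [pvGoA]
  | cons c rest ih =>
    by_cases hv : ("aeiou".toList.contains c) = true
    · have hd : c = 'a' ∨ c = 'e' ∨ c = 'i' ∨ c = 'o' ∨ c = 'u' := by simpa using hv
      have hx : c ≠ 'x' := by rcases hd with h|h|h|h|h <;> simp [h]
      rcases hd with h|h|h|h|h <;> subst h <;>
        simp [pvGoA, List.takeWhile, ih] <;> ring
    · by_cases hx : c = 'x'
      · simp [pvGoA, hx, List.takeWhile]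
      · have hv' : (decide (c = 'a') || (decide (c = 'e') || (decide (c = 'i') ||
            (decide (c = 'o') || decide (c = 'u'))))) = false := by
          simpa using hv
        simp [pvGoA, hx, List.takeWhile, hv', ih]

-- ===== VERDICT (by name: the statement is the Claim_ definition above) =====
theorem count_vowels_until_x_spec : Claim_equal_count_vowels_until_x := by
  intro s _
  unfold Spec_count_vowels_until_x count_vowels_until_x count_vowels_until_x_alt
  simpa using pvGoA_eq s.toList 0
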